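-- pv_equiv track=rewrite | github.com/Ento0n/MasterPraktikum | src/create_synteny_plot.py | coordinates2segments
-- ===== SOURCE A (Python) =====
-- def coordinates2segments(starts: list, stops: list):
--     starts.sort()
--     stops.sort()
--
--     # buffer around the starts and stop for nicer displaying
--     buffer = 2000
--
--     segments = list()
--     next_segment_start = starts[0] - buffer
--     gene2exon_index = 0
--     index_list = list()
--     for i, stop in enumerate(stops):
--         # check whether all are processed
--         if i+1 == len(stops):
--             # add last segment
--             segments.append((next_segment_start, stop + buffer))
--
--             # add index of last gene
--             index_list.append(gene2exon_index)
--
--             # end loop, all found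
--             break
--
--         # get second coordinate
--         start_next = starts[i+1]
--
--         # add index to index list before check for new segment, always looking at next start
--         index_list.append(gene2exon_index)
--
--         # check whether distance is higher than 60000, otherwise split into segments, avg length gene 62.000
--         if start_next - stop > 40000:
--             # create new segment
--             new_segment = (next_segment_start, stop + buffer)
--             segments.append(new_segment)
--
--             # save next segment start for next new segment
--             next_segment_start = start_next - buffer
--
--             # new segment, increment counter
--             gene2exon_index += 1
--
--     if not segments:
--         segments.append((starts[0], stops[0]))
--
--     return segments, index_list
-- ===== SOURCE B (Python) =====
-- def coordinates2segments(starts: list, stops: list):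
--     # Note: like the original, sorts both argument lists in place.
--     starts.sort()
--     stops.sort()
--
--     buffer = 2000
--     n = len(stops)
--
--     # phase 1: break positions — gaps larger than 40000 between a stop and the next start
--     breaks = [i for i in range(n - 1) if starts[i + 1] - stops[i] > 40000]
--
--     # phase 2: run boundaries; run k spans genes bounds[k]+1 .. bounds[k+1]
--     bounds = [-1] + breaks + [n - 1]
--
--     segments = [(starts[bounds[k] + 1] - buffer, stops[bounds[k + 1]] + buffer)
--                 for k in range(len(bounds) - 1)]
--
--     index_list = []
--     for k in range(len(bounds) - 1):
--         index_list.extend([k] * (bounds[k + 1] - bounds[k]))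
--
--     return segments, index_list
-- ===== Notes on version B (the rewrite author's own statement) =====
-- stated objective: alternative
-- what changed: Replaces A's single stateful loop (carrying next_segment_start, gene2exon_index and both output lists) by a two-phase plan: first compute the list of break positions (gaps > 40000), then emit segments and the index list directly from the resulting runs.
import Mathlib
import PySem

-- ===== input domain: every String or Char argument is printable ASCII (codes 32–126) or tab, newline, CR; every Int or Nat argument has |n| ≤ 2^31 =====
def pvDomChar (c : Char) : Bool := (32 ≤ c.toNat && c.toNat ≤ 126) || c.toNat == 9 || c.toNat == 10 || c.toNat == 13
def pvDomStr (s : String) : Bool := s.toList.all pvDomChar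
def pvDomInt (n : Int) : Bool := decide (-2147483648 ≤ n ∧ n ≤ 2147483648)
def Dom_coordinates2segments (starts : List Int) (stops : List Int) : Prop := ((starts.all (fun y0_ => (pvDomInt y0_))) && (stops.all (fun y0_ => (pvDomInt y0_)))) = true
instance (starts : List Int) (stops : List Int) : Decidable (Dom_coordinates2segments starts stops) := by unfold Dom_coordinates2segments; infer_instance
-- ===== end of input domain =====

-- B groups the sorted genes in two phases (gap/break positions, then runs) instead of A's single
-- stateful loop; same return value, and like A both ports model lists sorted in place (both Pythons
-- sort their arguments in place — the equivalence claimed is about the identical return value).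

-- ===== PORT A =====
-- the for-loop over enumerate(stops): state (i, next_segment_start, gene2exon_index, segments, index_list)
def c2sLoop (ss : List Int) : Nat → Int → Int → List (Int × Int) → List Int → List Int → (List (Int × Int)) × List Int
  | _, _, _, segs, il, [] => (segs, il)
  | _, ns, g, segs, il, [stop] => (segs ++ [(ns, stop + 2000)], il ++ [g])
  | i, ns, g, segs, il, stop :: stop' :: rest =>
      let startNext := PySem.List.pyGetD ss ((i : Int) + 1) 0
      if startNext - stop > 40000 then
        c2sLoop ss (i+1) (startNext - 2000) (g+1) (segs ++ [(ns, stop + 2000)]) (il ++ [g]) (stop' :: rest)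
      else
        c2sLoop ss (i+1) ns g segs (il ++ [g]) (stop' :: rest)

def coordinates2segments (starts : List Int) (stops : List Int) : (List (Int × Int)) × List Int :=
  let ss := PySem.List.sorted starts (fun x => x) false
  let ts := PySem.List.sorted stops (fun x => x) false
  let r := c2sLoop ss 0 (PySem.List.pyGetD ss 0 0 - 2000) 0 [] [] ts
  if r.1 = [] then (r.1 ++ [(PySem.List.pyGetD ss 0 0, PySem.List.pyGetD ts 0 0)], r.2) else r

-- ===== PORT B =====
-- the break condition of Source B's comprehension: starts[i+1] - stops[i] > 40000
def brkP (ss ts : List Int) (i : Nat) : Bool :=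
  decide (PySem.List.pyGetD ss ((i : Int) + 1) 0 - PySem.List.pyGetD ts (i : Int) 0 > 40000)

def coordinates2segments_alt (starts : List Int) (stops : List Int) : (List (Int × Int)) × List Int :=
  let ss := PySem.List.sorted starts (fun x => x) false
  let ts := PySem.List.sorted stops (fun x => x) false
  let n := ts.length
  let breaks := (List.range (n - 1)).filter (brkP ss ts)
  let bounds : List Int := (-1) :: (breaks.map (fun (b : Nat) => (b : Int)) ++ [(n : Int) - 1])
  let segments := (List.range (bounds.length - 1)).map (fun k =>
      (PySem.List.pyGetD ss (bounds.getD k 0 + 1) 0 - 2000,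
       PySem.List.pyGetD ts (bounds.getD (k+1) 0) 0 + 2000))
  let indexList := (List.range (bounds.length - 1)).foldl (fun acc k =>
      acc ++ List.replicate ((bounds.getD (k+1) 0 - bounds.getD k 0).toNat) ((k : Int))) []
  (segments, indexList)

-- ===== PRECONDITION & SPEC =====
-- A raises IndexError iff stops is empty (starts[0] or stops[0]) or len(starts) < len(stops)
-- (starts[i+1] runs off the end); Pre_ excludes exactly those inputs.
def Pre_coordinates2segments (starts : List Int) (stops : List Int) : Prop :=
  stops ≠ [] ∧ stops.length ≤ starts.length
instance (starts : List Int) (stops : List Int) : Decidable (Pre_coordinates2segments starts stops) := by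
  unfold Pre_coordinates2segments; infer_instance

def pvWitness_coordinates2segments : List Int × List Int := ([0, 100000], [1000, 101000])

def Spec_coordinates2segments (starts : List Int) (stops : List Int) (out : (List (Int × Int)) × List Int) : Prop := out = coordinates2segments_alt starts stops
instance (starts : List Int) (stops : List Int) (out : (List (Int × Int)) × List Int) : Decidable (Spec_coordinates2segments starts stops out) := by unfold Spec_coordinates2segments; infer_instance

-- ===== CLAIM (what is proved, stated in full; the proofs are below) =====
def Claim_equal_coordinates2segments : Prop := ∀ (starts : List Int) (stops : List Int), Dom_coordinates2segments starts stops → Pre_coordinates2segments starts stops → Spec_coordinates2segments starts stops (coordinates2segments starts stops)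

-- ===== LEMMAS AND PROOFS =====

-- break positions from index i on (B computes breaksFrom 0)
def breaksFrom (ss ts : List Int) (i : Nat) : List Nat :=
  (List.range' i (ts.length - 1 - i)).filter (brkP ss ts)

-- the segment list generated by a run structure: head segment starts at ns,
-- each break b closes a segment at stops[b]+buffer and opens one at starts[b+1]-buffer
def segsOf (ss ts : List Int) (ns : Int) : List Nat → List (Int × Int)
  | [] => [(ns, PySem.List.pyGetD ts ((ts.length : Int) - 1) 0 + 2000)]
  | b :: bs => (ns, PySem.List.pyGetD ts ((b : Int)) 0 + 2000) ::
      segsOf ss ts (PySem.List.pyGetD ss ((b : Int) + 1) 0 - 2000) bs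

-- the index list generated by runs: genes prev+1 .. b get value c, then recurse with c+1
def runIdx (n : Nat) (c prev : Int) : List Nat → List Int
  | [] => List.replicate (((n : Int) - 1 - prev).toNat) c
  | b :: bs => List.replicate (((b : Int) - prev).toNat) c ++ runIdx n (c+1) ((b : Int)) bs

lemma segsOf_ne_nil (ss ts : List Int) (ns : Int) (bl : List Nat) :
    segsOf ss ts ns bl ≠ [] := by cases bl <;> simp [segsOf]

lemma mem_breaksFrom (ss ts : List Int) (j b : Nat) (h : b ∈ breaksFrom ss ts j) : j ≤ b := by
  unfold breaksFrom at h
  have := List.mem_of_mem_filter h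
  rw [List.mem_range'] at this
  omega

lemma runIdx_shift (n : Nat) (c prev : Int) (bl : List Nat)
    (h : prev < (n : Int) - 1) (hb : ∀ b ∈ bl, prev < (b : Int)) :
    runIdx n c prev bl = c :: runIdx n c (prev+1) bl := by
  cases bl with
  | nil =>
    simp only [runIdx]
    rw [show ((n : Int) - 1 - prev).toNat = ((n : Int) - 1 - (prev+1)).toNat + 1 by omega,
      List.replicate_succ]
  | cons b bs =>
    have hbb := hb b (by simp)
    simp only [runIdx]
    rw [show ((b : Int) - prev).toNat = ((b : Int) - (prev+1)).toNat + 1 by omega,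
      List.replicate_succ, List.cons_append]

-- A's loop, started at index i with the tail ts.drop i, produces exactly the run structure
lemma loop_eq (ss ts : List Int) :
    ∀ (rest : List Int) (i : Nat) (ns g : Int) (segs : List (Int × Int)) (il : List Int),
      rest ≠ [] → rest = ts.drop i →
      c2sLoop ss i ns g segs il rest =
        (segs ++ segsOf ss ts ns (breaksFrom ss ts i),
         il ++ runIdx ts.length g ((i : Int) - 1) (breaksFrom ss ts i)) := by
  intro rest
  induction rest with
  | nil => intro i ns g segs il h _; exact (h rfl).elim
  | cons stop rest' IH =>
    intro i ns g segs il _ hdrop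
    have hlen : ts.length - i = rest'.length + 1 := by
      have := congrArg List.length hdrop
      simpa using this.symm
    have hi : i < ts.length := by omega
    have h0 : ts[i]? = some stop := by
      have h0 : (ts.drop i)[0]? = some stop := by rw [← hdrop]; rfl
      rw [List.getElem?_drop] at h0
      simpa using h0
    have hstop : ts.getD i 0 = stop := by simp [List.getD, h0]
    cases rest' with
    | nil =>
      simp only [List.length_nil] at hlen
      have hn : i = ts.length - 1 := by omega
      have hb : breaksFrom ss ts i = [] := by
        unfold breaksFrom; rw [show ts.length - 1 - i = 0 by omega]; rfl
      have h1 : PySem.List.pyGetD ts ((ts.length : Int) - 1) 0 = stop := by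
        rw [show ((ts.length : Int) - 1) = ((i : Nat) : Int) by omega,
          PySem.List.pyGetD_natCast, hstop]
      simp [c2sLoop, hb, segsOf, runIdx, h1, show ts.length - i = 1 from by omega]
    | cons stop' rest'' =>
      simp only [List.length_cons] at hlen
      have hm : ts.length - 1 - i = rest''.length + 1 := by omega
      have hdrop' : stop' :: rest'' = ts.drop (i+1) := by
        have : ts.drop (i+1) = (ts.drop i).drop 1 := by
          rw [List.drop_drop]
        rw [this, ← hdrop]; rfl
      have hbf : breaksFrom ss ts i =
          if brkP ss ts i then i :: breaksFrom ss ts (i+1) else breaksFrom ss ts (i+1) := by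
        unfold breaksFrom
        rw [hm, List.range'_succ, show ts.length - 1 - (i+1) = rest''.length by omega,
          List.filter_cons]
      simp only [c2sLoop]
      by_cases hc : PySem.List.pyGetD ss ((i : Int) + 1) 0 - stop > 40000
      · have hbt : brkP ss ts i = true := by
          simp only [brkP, decide_eq_true_eq, PySem.List.pyGetD_natCast, List.getD, h0,
            Option.getD_some]
          exact hc
        rw [if_pos hc]
        rw [IH (i+1) _ _ _ _ (by simp) hdrop']
        rw [hbf, hbt, if_pos rfl]
        rw [Prod.mk.injEq]
        constructor
        · rw [List.append_assoc]
          congr 1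
          simp [segsOf, PySem.List.pyGetD_natCast, List.getD, h0]
        · rw [List.append_assoc]
          congr 1
          simp only [runIdx]
          rw [show ((i : Int) - ((i : Int) - 1)).toNat = 1 by omega]
          simp only [List.replicate_succ, List.replicate_zero, List.cons_append, List.nil_append]
          congr 2
          push_cast; omega
      · have hbt : brkP ss ts i = false := by
          simp only [brkP, decide_eq_false_iff_not, PySem.List.pyGetD_natCast, List.getD, h0,
            Option.getD_some]
          exact hc
        rw [if_neg hc]
        rw [IH (i+1) _ _ _ _ (by simp) hdrop']
        rw [hbf, hbt, if_neg (by simp)]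
        rw [Prod.mk.injEq]
        constructor
        · rfl
        · rw [List.append_assoc]
          congr 1
          rw [runIdx_shift ts.length g ((i : Int) - 1) _ (by omega)
            (fun b hb => by have := mem_breaksFrom ss ts (i+1) b hb; omega)]
          simp only [List.singleton_append]
          congr 1
          push_cast
          ring_nf

-- B's segments comprehension over adjacent bounds equals the run recursion
lemma segB (ss ts : List Int) :
    ∀ (bl : List Nat) (prev : Int),
      (List.range (bl.length + 1)).map (fun k =>
        (PySem.List.pyGetD ss (((prev :: (bl.map (fun (b : Nat) => (b : Int)) ++ [(ts.length : Int) - 1])).getD k 0) + 1) 0 - 2000,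
         PySem.List.pyGetD ts ((prev :: (bl.map (fun (b : Nat) => (b : Int)) ++ [(ts.length : Int) - 1])).getD (k+1) 0) 0 + 2000))
      = segsOf ss ts (PySem.List.pyGetD ss (prev + 1) 0 - 2000) bl := by
  intro bl
  induction bl with
  | nil => intro prev; simp [segsOf, List.range_succ]
  | cons b bs IH =>
    intro prev
    rw [show (b :: bs).length + 1 = (bs.length + 1) + 1 from rfl, List.range_succ_eq_map]
    simp only [List.map_cons, List.map_map]
    rw [show (segsOf ss ts (PySem.List.pyGetD ss (prev + 1) 0 - 2000) (b :: bs)) =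
      (PySem.List.pyGetD ss (prev + 1) 0 - 2000, PySem.List.pyGetD ts ((b : Int)) 0 + 2000) ::
        segsOf ss ts (PySem.List.pyGetD ss ((b : Int) + 1) 0 - 2000) bs from rfl]
    congr 1
    rw [← IH ((b : Int))]
    apply List.map_congr_left
    intro k _
    simp

-- B's index_list loop over adjacent bounds equals the run recursion
lemma idxB (ts : List Int) :
    ∀ (bl : List Nat) (prev c : Int),
      (List.range (bl.length + 1)).flatMap (fun k =>
        List.replicate (((prev :: (bl.map (fun (b : Nat) => (b : Int)) ++ [(ts.length : Int) - 1])).getD (k+1) 0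
          - (prev :: (bl.map (fun (b : Nat) => (b : Int)) ++ [(ts.length : Int) - 1])).getD k 0).toNat) (c + (k : Int)))
      = runIdx ts.length c prev bl := by
  intro bl
  induction bl with
  | nil => intro prev c; simp [runIdx, List.range_succ]
  | cons b bs IH =>
    intro prev c
    rw [show (b :: bs).length + 1 = (bs.length + 1) + 1 from rfl, List.range_succ_eq_map]
    rw [List.flatMap_cons, List.flatMap_map]
    rw [show (runIdx ts.length c prev (b :: bs)) =
      List.replicate (((b : Int) - prev).toNat) c ++ runIdx ts.length (c+1) ((b : Int)) bs from rfl]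
    congr 1
    · simp
    · rw [← IH ((b : Int)) (c+1)]
      congr 1
      funext k
      simp only [List.getD_cons_succ]
      congr 1
      push_cast
      ring_nf

-- ===== VERDICT (by name: the statement is the Claim_ definition above) =====
theorem coordinates2segments_spec : Claim_equal_coordinates2segments := by
  intro starts stops _ hpre
  obtain ⟨hne, hlen⟩ := hpre
  simp only [Spec_coordinates2segments, coordinates2segments, coordinates2segments_alt]
  set ss := PySem.List.sorted starts (fun x => x) false with hss
  set ts := PySem.List.sorted stops (fun x => x) false with hts
  have htsl : ts.length = stops.length := by rw [hts]; simp
  have htsne : ts ≠ [] := by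
    intro h
    apply hne
    have := congrArg List.length h
    rw [htsl] at this
    simpa using this
  rw [loop_eq ss ts ts 0 _ 0 [] [] htsne (List.drop_zero).symm]
  simp only [List.nil_append]
  rw [if_neg (by simp [segsOf_ne_nil])]
  have hbr : (List.range (ts.length - 1)).filter (brkP ss ts) = breaksFrom ss ts 0 := by
    unfold breaksFrom
    rw [List.range_eq_range']
    simp
  rw [hbr]
  simp only [List.length_cons, List.length_append, List.length_map, Nat.add_sub_cancel]
  rw [Prod.mk.injEq]
  constructor
  · have h := segB ss ts (breaksFrom ss ts 0) (-1)
    rw [show (-1 : Int) + 1 = 0 by norm_num] at h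
    exact h.symm
  · have h := idxB ts (breaksFrom ss ts 0) (-1) 0
    simp only [Int.zero_add] at h
    rw [PySem.List.foldl_append_eq_flatMap, List.nil_append]
    rw [show ((0 : Nat) : Int) - 1 = (-1 : Int) by norm_num]
    exact h.symm
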